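-- pv_equiv track=rewrite | github.com/shaunthebuilder/Open-GR-WM | app.py | split_think_and_answer
-- ===== SOURCE A (Python) =====
-- from typing import Callable, Dict, List, Optional, Tuple
--
-- def split_think_and_answer(text: str) -> Tuple[str, str]:
--     if not text:
--         return "", ""
--     lower = text.lower()
--     i = 0
--     in_think = False
--     think_chars: List[str] = []
--     answer_chars: List[str] = []
--     while i < len(text):
--         if lower.startswith("<think>", i):
--             in_think = True
--             i += len("<think>")
--             continue
--         if lower.startswith("</think>", i):
--             in_think = False
--             i += len("</think>")
--             continue
--         if in_think:
--             think_chars.append(text[i])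
--         else:
--             answer_chars.append(text[i])
--         i += 1
--     return "".join(think_chars).strip(), "".join(answer_chars).strip()
-- ===== SOURCE B (Python) =====
-- from typing import Tuple
--
--
-- def split_think_and_answer(text: str) -> Tuple[str, str]:
--     # Jump between tag occurrences with str.find and append whole slices,
--     # instead of scanning character by character.
--     if not text:
--         return "", ""
--     lower = text.lower()
--     think, answer = [], []
--     in_think = False
--     i = 0
--     while True:
--         po = lower.find("<think>", i)
--         pc = lower.find("</think>", i)
--         if po == -1 and pc == -1:
--             (think if in_think else answer).append(text[i:])
--             break
--         if pc == -1 or (po != -1 and po < pc):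
--             (think if in_think else answer).append(text[i:po])
--             in_think = True
--             i = po + 7
--         else:
--             (think if in_think else answer).append(text[i:pc])
--             in_think = False
--             i = pc + 8
--     return "".join(think).strip(), "".join(answer).strip()
-- ===== Notes on version B (the rewrite author's own statement) =====
-- stated objective: faster
-- what changed: Replaces the per-character Python scan that tests both tags at every index with a loop that jumps directly between tag occurrences via str.find and appends whole slices between tags (C-speed find/slicing instead of per-character interpreter work).
import Mathlib
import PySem

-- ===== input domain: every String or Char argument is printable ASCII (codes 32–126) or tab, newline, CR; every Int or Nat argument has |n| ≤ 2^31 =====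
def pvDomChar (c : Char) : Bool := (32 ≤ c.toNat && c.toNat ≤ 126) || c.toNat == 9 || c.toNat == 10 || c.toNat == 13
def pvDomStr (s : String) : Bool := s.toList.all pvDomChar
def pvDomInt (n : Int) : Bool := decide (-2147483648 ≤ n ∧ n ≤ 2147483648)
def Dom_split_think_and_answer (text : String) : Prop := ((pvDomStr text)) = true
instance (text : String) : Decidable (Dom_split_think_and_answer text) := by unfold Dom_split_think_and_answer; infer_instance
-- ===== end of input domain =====

-- B replaces A's per-character scan (startswith test at every index) by a loop that jumps
-- between tag occurrences with str.find and appends whole slices (measured faster by the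
-- timing run); same return value, proved equal.

-- the two tag literals "<think>" / "</think>" as character lists (shared constants)
def pvOpenTag : List Char := ['<', 't', 'h', 'i', 'n', 'k', '>']
def pvCloseTag : List Char := ['<', '/', 't', 'h', 'i', 'n', 'k', '>']

-- ===== PORT A =====
-- the while loop: i, in_think, think_chars, answer_chars; lower.startswith(tag, i) is
-- exact as PySem.Chars.startswith on lower.drop i (i is a nonnegative index)
def pvALoop (text lower : List Char) (i : Nat) (in_think : Bool) (think ans : List Char) :
    List Char × List Char :=
  if h : i < text.length then
    if PySem.Chars.startswith (lower.drop i) pvOpenTag then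
      pvALoop text lower (i + 7) true think ans
    else if PySem.Chars.startswith (lower.drop i) pvCloseTag then
      pvALoop text lower (i + 8) false think ans
    else if in_think then
      pvALoop text lower (i + 1) in_think (think ++ [text[i]]) ans
    else
      pvALoop text lower (i + 1) in_think think (ans ++ [text[i]])
  else (think, ans)
termination_by text.length - i
decreasing_by all_goals omega

def split_think_and_answer (text : String) : String × String :=
  if text = "" then ("", "")
  else
    let lower := PySem.Str.lower text
    let r := pvALoop text.toList lower.toList 0 false [] []
    (String.ofList (PySem.Chars.strip r.1), String.ofList (PySem.Chars.strip r.2))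

-- ===== PORT B =====
-- facts about str.find(sub, k) used by pvBLoop's termination (cited in decreasing_by)
theorem pvFindFrom_spec' (s sub : List Char) (k : Nat) (hsub : sub ≠ [])
    (h : PySem.Chars.findFrom s sub (k : Int) none ≠ -1) :
    0 ≤ PySem.Chars.findFrom s sub (k : Int) none ∧
    k ≤ (PySem.Chars.findFrom s sub (k : Int) none).toNat ∧
    (PySem.Chars.findFrom s sub (k : Int) none).toNat + sub.length ≤ s.length ∧
    sub <+: s.drop (PySem.Chars.findFrom s sub (k : Int) none).toNat ∧
    ∀ j, k ≤ j → j < (PySem.Chars.findFrom s sub (k : Int) none).toNat →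
      ¬ sub <+: s.drop j := by
  have hl : 0 < sub.length := by
    cases sub with
    | nil => exact absurd rfl hsub
    | cons c cs => simp
  by_cases hk : k ≤ s.length
  · obtain ⟨h1, h2, h3⟩ := PySem.Chars.findFrom_natCast_spec s sub k hk h
    have h0 : (0 : Int) ≤ PySem.Chars.findFrom s sub (k : Int) none :=
      le_trans (Int.natCast_nonneg k) h1
    have hpre := h2.length_le
    rw [List.length_drop] at hpre
    refine ⟨h0, by omega, by omega, h2, h3⟩
  · exfalso
    apply h
    simp only [PySem.Chars.findFrom]
    have h1 : ¬ ((k : Int) < 0) := by omega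
    have h2 : (s.length : Int) < (k : Int) := by exact_mod_cast by omega
    rw [if_neg h1]
    rw [if_pos h2]

-- the while True loop of B: find both tags from i, jump to the nearer one
def pvBLoop (text lower : List Char) (i : Nat) (in_think : Bool) (think ans : List Char) :
    List Char × List Char :=
  let po := PySem.Chars.findFrom lower pvOpenTag (i : Int) none
  let pc := PySem.Chars.findFrom lower pvCloseTag (i : Int) none
  if po = -1 ∧ pc = -1 then
    if in_think then (think ++ PySem.List.slice text (some (i : Int)) none, ans)
    else (think, ans ++ PySem.List.slice text (some (i : Int)) none)
  else if pc = -1 ∨ (po ≠ -1 ∧ po < pc) then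
    let seg := PySem.List.slice text (some (i : Int)) (some po)
    pvBLoop text lower (po.toNat + 7) true
      (if in_think then think ++ seg else think)
      (if in_think then ans else ans ++ seg)
  else
    let seg := PySem.List.slice text (some (i : Int)) (some pc)
    pvBLoop text lower (pc.toNat + 8) false
      (if in_think then think ++ seg else think)
      (if in_think then ans else ans ++ seg)
termination_by lower.length + 1 - i
decreasing_by
  · have hpo : PySem.Chars.findFrom lower pvOpenTag (i : Int) none ≠ -1 := by tauto
    have := pvFindFrom_spec' lower pvOpenTag i (by decide) hpo
    have hlen : pvOpenTag.length = 7 := by decide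
    omega
  · have hpc : PySem.Chars.findFrom lower pvCloseTag (i : Int) none ≠ -1 := by tauto
    have := pvFindFrom_spec' lower pvCloseTag i (by decide) hpc
    have hlen : pvCloseTag.length = 8 := by decide
    omega

def split_think_and_answer_alt (text : String) : String × String :=
  if text = "" then ("", "")
  else
    let lower := PySem.Str.lower text
    let r := pvBLoop text.toList lower.toList 0 false [] []
    (String.ofList (PySem.Chars.strip r.1), String.ofList (PySem.Chars.strip r.2))

-- ===== PRECONDITION & SPEC =====
def Spec_split_think_and_answer (text : String) (out : String × String) : Prop := out = split_think_and_answer_alt text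
instance (text : String) (out : String × String) : Decidable (Spec_split_think_and_answer text out) := by unfold Spec_split_think_and_answer; infer_instance

-- ===== CLAIM (what is proved, stated in full; the proofs are below) =====
def Claim_equal_split_think_and_answer : Prop := ∀ (text : String), Dom_split_think_and_answer text → Spec_split_think_and_answer text (split_think_and_answer text)

-- ===== LEMMAS AND PROOFS =====

-- neither tag occurs (as a prefix of lower.drop j) at position j
def pvNoTag (lower : List Char) (j : Nat) : Prop :=
  ¬ pvOpenTag <+: lower.drop j ∧ ¬ pvCloseTag <+: lower.drop j

theorem pvPrefix_drop_infix {α : Type} {sub l : List α} {m : Nat}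
    (h : sub <+: l.drop m) : sub <:+: l :=
  h.isInfix.trans (List.drop_suffix m l).isInfix

theorem pvNotBoth (l : List Char) (h1 : pvOpenTag <+: l) (h2 : pvCloseTag <+: l) : False := by
  obtain ⟨t1, e1⟩ := h1
  obtain ⟨t2, e2⟩ := h2
  rw [← e1] at e2
  simp [pvOpenTag, pvCloseTag] at e2

-- find(sub, k) = -1 ⇒ no occurrence at any j ≥ k
theorem pvFindFrom_none (s sub : List Char) (k : Nat)
    (h : PySem.Chars.findFrom s sub (k : Int) none = -1) :
    ∀ j, k ≤ j → j < s.length → ¬ sub <+: s.drop j := by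
  intro j hkj hj hpre
  by_cases hk : k ≤ s.length
  · rw [PySem.Chars.findFrom_natCast_eq_neg_one_iff s sub k hk] at h
    apply h
    have : s.drop j = (s.drop k).drop (j - k) := by
      rw [List.drop_drop]
      congr 1
      omega
    rw [this] at hpre
    exact pvPrefix_drop_infix hpre
  · omega

-- A's loop with no tag anywhere from i: it appends text[i:] char by char
theorem pvALoop_noTag (text lower : List Char) (i : Nat)
    (hno : ∀ j, i ≤ j → j < text.length → pvNoTag lower j) (b : Bool) (t a : List Char) :
    pvALoop text lower i b t a =
      (if b then (t ++ text.drop i, a) else (t, a ++ text.drop i)) := by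
  fun_induction pvALoop text lower i b t a with
  | case1 i b t a h hop ih =>
      exact absurd ((PySem.Chars.startswith_iff _ _).mp hop) (hno i le_rfl h).1
  | case2 i b t a h hop hcl ih =>
      exact absurd ((PySem.Chars.startswith_iff _ _).mp hcl) (hno i le_rfl h).2
  | case3 i t a h hop hcl ih =>
      rw [ih (fun j hj hj2 => hno j (by omega) hj2)]
      rw [List.drop_eq_getElem_cons h]
      simp
  | case4 i b t a h hop hcl hb ih =>
      rw [ih (fun j hj hj2 => hno j (by omega) hj2)]
      have hb' : b = false := by simpa using hb
      subst hb'
      rw [List.drop_eq_getElem_cons h]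
      simp
  | case5 i b t a h =>
      rw [List.drop_eq_nil_of_le (by omega)]
      cases b <;> simp

-- A's loop with no tag on [i, p): it walks to p appending text[i:p]
theorem pvALoop_skip (text lower : List Char) (p : Nat)
    (hp : p ≤ text.length) (b : Bool) :
    ∀ (k i : Nat) (t a : List Char), i ≤ p → p - i = k →
    (∀ j, i ≤ j → j < p → pvNoTag lower j) →
    pvALoop text lower i b t a =
      pvALoop text lower p b
        (if b then t ++ (text.drop i).take (p - i) else t)
        (if b then a else a ++ (text.drop i).take (p - i)) := by
  intro k
  induction k using Nat.strong_induction_on with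
  | _ k ih =>
  intro i t a hip hk hno
  cases k with
  | zero =>
      have : i = p := by omega
      subst this
      cases b <;> simp
  | succ k' =>
      have hi : i < p := by omega
      have hit : i < text.length := by omega
      conv_lhs => rw [pvALoop]
      rw [dif_pos hit]
      rw [if_neg (by
        intro hop
        exact (hno i le_rfl hi).1 ((PySem.Chars.startswith_iff _ _).mp hop))]
      rw [if_neg (by
        intro hcl
        exact (hno i le_rfl hi).2 ((PySem.Chars.startswith_iff _ _).mp hcl))]
      have htake : (text.drop i).take (p - i) =
          text[i] :: (text.drop (i + 1)).take (p - (i + 1)) := by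
        rw [List.drop_eq_getElem_cons hit]
        have h2 : p - i = (p - (i + 1)) + 1 := by omega
        rw [h2, List.take_succ_cons]
      cases b with
      | true =>
          rw [if_pos rfl, if_pos rfl]
          rw [ih k' (by omega) (i + 1) (t ++ [text[i]]) a (by omega) (by omega)
            (fun j hj hj2 => hno j (by omega) hj2)]
          rw [if_pos rfl, if_pos rfl, htake]
          simp
      | false =>
          rw [if_neg (by simp), if_neg (by simp)]
          rw [ih k' (by omega) (i + 1) t (a ++ [text[i]]) (by omega) (by omega)
            (fun j hj hj2 => hno j (by omega) hj2)]
          rw [if_neg (by simp), if_neg (by simp), htake]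
          simp

-- the core equivalence of the two loops
theorem pvLoops_eq (text lower : List Char) (hlen : lower.length = text.length)
    (i : Nat) (b : Bool) (t a : List Char) :
    pvALoop text lower i b t a = pvBLoop text lower i b t a := by
  fun_induction pvBLoop text lower i b t a with
  | case1 i t a po pc hb =>
      have hno : ∀ j, i ≤ j → j < text.length → pvNoTag lower j := by
        intro j hj hj2
        exact ⟨pvFindFrom_none lower pvOpenTag i hb.1 j hj (by omega),
               pvFindFrom_none lower pvCloseTag i hb.2 j hj (by omega)⟩
      rw [pvALoop_noTag text lower i hno]
      rw [if_pos rfl]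
      rw [PySem.List.slice_from text (Int.natCast_nonneg i)]
      rw [Int.toNat_natCast]
  | case2 i b t a po pc hb hbt =>
      have hno : ∀ j, i ≤ j → j < text.length → pvNoTag lower j := by
        intro j hj hj2
        exact ⟨pvFindFrom_none lower pvOpenTag i hb.1 j hj (by omega),
               pvFindFrom_none lower pvCloseTag i hb.2 j hj (by omega)⟩
      rw [pvALoop_noTag text lower i hno]
      rw [if_neg hbt]
      rw [PySem.List.slice_from text (Int.natCast_nonneg i)]
      rw [Int.toNat_natCast]
  | case3 i b t a po pc h1 h2 seg ih =>
      have hpoe : po = PySem.Chars.findFrom lower pvOpenTag (i : Int) none := rfl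
      have hsege : seg = PySem.List.slice text (some (i : Int))
          (some (PySem.Chars.findFrom lower pvOpenTag (i : Int) none)) := rfl
      have hpo : PySem.Chars.findFrom lower pvOpenTag (i : Int) none ≠ -1 := by
        rw [← hpoe]; tauto
      obtain ⟨h0, hki, hpl, hpre, hmin⟩ := pvFindFrom_spec' lower pvOpenTag i (by decide) hpo
      have hL7 : pvOpenTag.length = 7 := by decide
      rw [← hpoe] at h0 hki hpl hpre hmin
      have hnoclose : ∀ j, i ≤ j → j < po.toNat → ¬ pvCloseTag <+: lower.drop j := by
        intro j hj hj2
        rcases h2 with hpc | ⟨hpo', hlt⟩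
        · exact pvFindFrom_none lower pvCloseTag i hpc j hj (by omega)
        · have hpce : pc = PySem.Chars.findFrom lower pvCloseTag (i : Int) none := rfl
          have hpcne : PySem.Chars.findFrom lower pvCloseTag (i : Int) none ≠ -1 := by
            rw [← hpce]; omega
          obtain ⟨hc0, hcki, hccl, hcpre, hcmin⟩ :=
            pvFindFrom_spec' lower pvCloseTag i (by decide) hpcne
          rw [← hpce] at hc0 hcmin
          exact hcmin j hj (by omega)
      have hno : ∀ j, i ≤ j → j < po.toNat → pvNoTag lower j :=
        fun j hj hj2 => ⟨hmin j hj hj2, hnoclose j hj hj2⟩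
      have hpt : po.toNat ≤ text.length := by omega
      rw [pvALoop_skip text lower po.toNat hpt b (po.toNat - i) i t a hki rfl hno]
      conv_lhs => rw [pvALoop]
      rw [dif_pos (show po.toNat < text.length by omega)]
      rw [if_pos ((PySem.Chars.startswith_iff _ _).mpr hpre)]
      have hcast : po = ((po.toNat : Nat) : Int) := by omega
      have hslice : seg = List.take (po.toNat - i) (List.drop i text) := by
        rw [hsege, ← hpoe]
        conv_lhs => rw [hcast, PySem.List.slice_natCast]
      rw [hslice] at ih ⊢
      simp only [dite_eq_ite] at ih
      exact ih
  | case4 i b t a po pc h1 h2 seg ih =>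
      have hpce : pc = PySem.Chars.findFrom lower pvCloseTag (i : Int) none := rfl
      have hsege : seg = PySem.List.slice text (some (i : Int))
          (some (PySem.Chars.findFrom lower pvCloseTag (i : Int) none)) := rfl
      have hpc : pc ≠ -1 := fun hh => h2 (Or.inl hh)
      have h2b : po ≠ -1 → pc ≤ po := by
        intro hp
        by_contra hlt
        exact h2 (Or.inr ⟨hp, by omega⟩)
      have hpcne : PySem.Chars.findFrom lower pvCloseTag (i : Int) none ≠ -1 := by
        rw [← hpce]; exact hpc
      obtain ⟨h0, hki, hpl, hpre, hmin⟩ := pvFindFrom_spec' lower pvCloseTag i (by decide) hpcne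
      have hL8 : pvCloseTag.length = 8 := by decide
      rw [← hpce] at h0 hki hpl hpre hmin
      have hnoopen : ∀ j, i ≤ j → j < pc.toNat → ¬ pvOpenTag <+: lower.drop j := by
        intro j hj hj2
        by_cases hpoe2 : po = -1
        · exact pvFindFrom_none lower pvOpenTag i hpoe2 j hj (by omega)
        · have hpoe : po = PySem.Chars.findFrom lower pvOpenTag (i : Int) none := rfl
          obtain ⟨ho0, hoki, hool, hopre, homin⟩ :=
            pvFindFrom_spec' lower pvOpenTag i (by decide) (by rw [← hpoe]; exact hpoe2)
          rw [← hpoe] at ho0 homin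
          have hle : pc ≤ po := h2b hpoe2
          exact homin j hj (by omega)
      have hno : ∀ j, i ≤ j → j < pc.toNat → pvNoTag lower j :=
        fun j hj hj2 => ⟨hnoopen j hj hj2, hmin j hj hj2⟩
      have hpt : pc.toNat ≤ text.length := by omega
      rw [pvALoop_skip text lower pc.toNat hpt b (pc.toNat - i) i t a hki rfl hno]
      conv_lhs => rw [pvALoop]
      rw [dif_pos (show pc.toNat < text.length by omega)]
      rw [if_neg (fun hs => pvNotBoth _ ((PySem.Chars.startswith_iff _ _).mp hs) hpre)]
      rw [if_pos ((PySem.Chars.startswith_iff _ _).mpr hpre)]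
      have hcast : pc = ((pc.toNat : Nat) : Int) := by omega
      have hslice : seg = List.take (pc.toNat - i) (List.drop i text) := by
        rw [hsege, ← hpce]
        conv_lhs => rw [hcast, PySem.List.slice_natCast]
      rw [hslice] at ih ⊢
      simp only [dite_eq_ite] at ih
      exact ih

-- ===== VERDICT (by name: the statement is the Claim_ definition above) =====
theorem split_think_and_answer_spec : Claim_equal_split_think_and_answer := by
  intro text _hd
  by_cases h : text = ""
  · simp [Spec_split_think_and_answer, split_think_and_answer, split_think_and_answer_alt, h]
  · have hlen : (PySem.Str.lower text).toList.length = text.toList.length := by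
      simp [PySem.Str.lower, PySem.Chars.lower]
    unfold Spec_split_think_and_answer split_think_and_answer split_think_and_answer_alt
    simp only [if_neg h]
    rw [pvLoops_eq text.toList (PySem.Str.lower text).toList hlen 0 false [] []]
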